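-- pv_equiv track=rewrite | github.com/eitchugo/happyfool-bot | src/happyfool_bot/db/dals.py | get_rank
-- ===== SOURCE A (Python) =====
-- def get_rank(ranks, points):
--     """
--     Gets a user rank based on points. The received ranks format is::
--
--         {
--             "<rank-name>": "<minimum-points>",
--             "Rank1": "0",
--             "Rank2: "1000",
--             "Rank3: "5000",
--             ...
--         }
--
--     Args:
--         ranks (dict): A dict with the ranks and minimum points to reach them. See method description.
--         points (int): Number of points to check for a rank
--
--     Returns:
--         str: Rank name
--     """
--     result = None
--     for rank, minimum in ranks.items():
--         if points >= int(minimum):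
--             result = f"{rank}"
--
--     if result is None:
--         result = "Sem rank"
--
--     return result
-- ===== SOURCE B (Python) =====
-- def get_rank(ranks, points):
--     for rank, minimum in reversed(ranks.items()):
--         if points >= int(minimum):
--             return rank
--     return "Sem rank"
-- ===== Notes on version B (the rewrite author's own statement) =====
-- stated objective: idiomatic
-- what changed: Replaces A's scan-all-and-keep-last-match loop over the dict with a reversed iteration that returns the first qualifying rank immediately (early exit), with no accumulator or None sentinel.
import Mathlib
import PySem

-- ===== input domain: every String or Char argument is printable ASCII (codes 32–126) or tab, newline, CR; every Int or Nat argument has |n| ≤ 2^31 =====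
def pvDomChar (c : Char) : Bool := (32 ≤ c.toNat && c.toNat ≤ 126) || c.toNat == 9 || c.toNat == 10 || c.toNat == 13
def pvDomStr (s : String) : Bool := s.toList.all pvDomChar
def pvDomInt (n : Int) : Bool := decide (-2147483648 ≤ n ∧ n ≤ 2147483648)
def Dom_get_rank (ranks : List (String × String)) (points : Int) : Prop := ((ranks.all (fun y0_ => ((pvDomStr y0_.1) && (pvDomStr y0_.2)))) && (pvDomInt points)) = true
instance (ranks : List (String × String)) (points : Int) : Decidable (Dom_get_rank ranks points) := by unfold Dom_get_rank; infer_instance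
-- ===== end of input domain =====

-- B replaces A's scan-all-keep-last loop with a reversed scan that returns the first
-- qualifying rank immediately (idiomatic early exit); return values proved equal on Pre_.

-- ===== PORT A =====
-- literal port: iterate dict items in order, keep the last rank whose minimum <= points
def get_rank (ranks : List (String × String)) (points : Int) : String :=
  let result : Option String :=
    (PySem.Dict.ofList ranks).items.foldl
      (fun result rm =>
        match PySem.Int.ofStr? rm.2 with
        | some m => if points ≥ m then some rm.1 else result
        | none => result)   -- int(minimum) raises here in Python; excluded by Pre_
      none
  match result with
  | none => "Sem rank"
  | some r => r

-- ===== PORT B =====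
-- first qualifying rank scanning the reversed items, early exit
def getRankRev (points : Int) : List (String × String) → String
  | [] => "Sem rank"
  | (rank, minimum) :: rest =>
    match PySem.Int.ofStr? minimum with
    | some m => if points ≥ m then rank else getRankRev points rest
    | none => getRankRev points rest   -- int(minimum) raises here in Python; excluded by Pre_

def get_rank_alt (ranks : List (String × String)) (points : Int) : String :=
  getRankRev points ((PySem.Dict.ofList ranks).items.reverse)

-- ===== PRECONDITION & SPEC =====
-- Pre_: every minimum value of the dict parses as a Python int (else int(minimum) raises ValueError in A)
def Pre_get_rank (ranks : List (String × String)) (points : Int) : Prop :=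
  ∀ p ∈ (PySem.Dict.ofList ranks).items, (PySem.Int.ofStr? p.2).isSome = true
instance (ranks : List (String × String)) (points : Int) : Decidable (Pre_get_rank ranks points) := by
  unfold Pre_get_rank; infer_instance
def pvWitness_get_rank : (List (String × String)) × Int :=
  ([("Rank1", "0"), ("Rank2", "1000")], 500)
def Spec_get_rank (ranks : List (String × String)) (points : Int) (out : String) : Prop := out = get_rank_alt ranks points
instance (ranks : List (String × String)) (points : Int) (out : String) : Decidable (Spec_get_rank ranks points out) := by unfold Spec_get_rank; infer_instance

-- ===== CLAIM (what is proved, stated in full; the proofs are below) =====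
def Claim_equal_get_rank : Prop := ∀ (ranks : List (String × String)) (points : Int), Dom_get_rank ranks points → Pre_get_rank ranks points → Spec_get_rank ranks points (get_rank ranks points)

-- ===== LEMMAS AND PROOFS =====

-- last match of a forward fold = first match of the reversed scan
theorem foldl_last_eq_rev_first (points : Int) (l : List (String × String)) :
    (match l.foldl
        (fun result rm =>
          match PySem.Int.ofStr? rm.2 with
          | some m => if points ≥ m then some rm.1 else result
          | none => result) none with
      | none => "Sem rank"
      | some r => r) = getRankRev points l.reverse := by
  induction l using List.reverseRecOn with
  | nil => simp [getRankRev]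
  | append_singleton xs x ih =>
    simp only [List.foldl_append, List.foldl_cons, List.foldl_nil, List.reverse_append,
      List.reverse_singleton, List.singleton_append]
    obtain ⟨rank, minimum⟩ := x
    simp only [getRankRev]
    cases h : PySem.Int.ofStr? minimum with
    | none => simpa using ih
    | some m =>
      by_cases hp : points ≥ m
      · simp [hp]
      · simpa [hp] using ih

-- ===== VERDICT (by name: the statement is the Claim_ definition above) =====
theorem get_rank_spec : Claim_equal_get_rank := by
  intro ranks points _ _
  unfold Spec_get_rank get_rank get_rank_alt
  exact foldl_last_eq_rev_first points (PySem.Dict.ofList ranks).items
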